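-- pv_equiv track=rewrite | github.com/tehw0lf/paw | paw/wgen.py | gen_wordlist
-- ===== SOURCE A (Python) =====
-- def gen_wordlist(charset, positions=None, prev_iter=None):
--     '''
--     Recursively generates a wordlist based on given sets of characters.
--     charset is a dictionary containing character sets for each
--     string position of the generated words.
--     '''
--     if prev_iter is None:
--         positions = [0 for i in charset]
--         iter = 0
--     else:
--         iter = prev_iter + 1
--     for idx, _ in enumerate(charset[iter]):
--         positions[iter] = idx
--         if iter == len(charset) - 1:
--             yield ''.join([charset[idx][val]
--                           for idx, val in enumerate(positions)])
--         else:
--             yield from gen_wordlist(charset, positions, iter)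
-- ===== SOURCE B (Python) =====
-- def gen_wordlist(charset, positions=None, prev_iter=None):
--     '''
--     Iterative wordlist generation: the words over positions start..end are
--     built breadth-first by extending every partial word with each character
--     of the next position's charset (so the last position varies fastest);
--     a resume call (prev_iter set) prepends the fixed prefix that the given
--     positions select for the positions before the resume point.
--     '''
--     start = 0 if prev_iter is None else prev_iter + 1
--     prefix = ''.join(charset[j][positions[j]] for j in range(start))
--     words = ['']
--     for i in range(start, len(charset)):
--         words = [w + ch for w in words for ch in charset[i]]
--     for w in words:
--         yield prefix + w
-- ===== Notes on version B (the rewrite author's own statement) =====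
-- stated objective: alternative
-- what changed: Replaces the recursive generator that mutates a shared positions list and re-joins every word from indices with a single breadth-first fold that extends each partial word by every character of the next charset, prepending the fixed prefix a resume call selects; Pre_ excludes inputs where A raises and resume calls on which A accidentally returns [] only because an empty charset empties the recursion before the invalid positions list or missing prefix key is touched (B validates its prefix eagerly and raises there).
-- outside the precondition, e.g. on gen_wordlist({}, None, None): A raises KeyError, B returns ['']; on gen_wordlist({0: 'a', 1: ''}, None, 0): A returns [], B raises TypeError; on gen_wordlist({0: 'b', 1: 'a', 2: ''}, [3, 2], 0): A returns [], B raises IndexError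
import Mathlib
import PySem

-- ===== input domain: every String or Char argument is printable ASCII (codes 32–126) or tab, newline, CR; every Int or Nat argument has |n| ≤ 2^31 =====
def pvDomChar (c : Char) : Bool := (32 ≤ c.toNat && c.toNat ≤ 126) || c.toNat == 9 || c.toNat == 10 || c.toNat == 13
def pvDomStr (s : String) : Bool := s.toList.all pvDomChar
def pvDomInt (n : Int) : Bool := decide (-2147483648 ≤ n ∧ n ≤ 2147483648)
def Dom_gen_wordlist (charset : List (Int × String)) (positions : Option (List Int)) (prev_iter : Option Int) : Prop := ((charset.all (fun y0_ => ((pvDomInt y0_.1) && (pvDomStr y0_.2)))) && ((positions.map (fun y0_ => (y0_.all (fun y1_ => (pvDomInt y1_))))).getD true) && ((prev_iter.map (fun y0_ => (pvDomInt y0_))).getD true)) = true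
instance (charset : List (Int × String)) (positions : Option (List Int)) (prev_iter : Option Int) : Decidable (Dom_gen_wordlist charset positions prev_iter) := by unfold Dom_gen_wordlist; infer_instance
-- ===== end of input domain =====

-- B replaces A's depth-first recursion over a mutable positions list by one
-- breadth-first fold that extends every partial word with each character of the
-- next position's charset. A mutates the caller's `positions` list in place on
-- resume calls; B does not — the equivalence proved here is about the RETURN
-- value only (same word list, same order).

-- ===== PORT A =====
-- charset[idx][val]: a Python 1-character string; "" where Python raises (such inputs are excluded by Pre_)
def pvCharAt (d : PySem.Dict Int String) (i : Int) (v : Int) : String :=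
  match PySem.Str.pyGet? (d.getD i "") v with
  | some c => String.ofList [c]
  | none => ""

-- ''.join([charset[idx][val] for idx, val in enumerate(positions)])
def pvJoinWord (d : PySem.Dict Int String) (positions : List Int) : String :=
  PySem.Str.join "" ((PySem.List.enumerate positions).map (fun p => pvCharAt d p.1 p.2))

-- positions[iter] = idx, Python's index rule hand-ported (negative counts from the end;
-- left unchanged where Python raises IndexError — excluded by Pre_)
def pvSetIdx (xs : List Int) (i : Int) (v : Int) : List Int :=
  let j := if i < 0 then i + xs.length else i
  if 0 ≤ j ∧ j < xs.length then xs.set j.toNat v else xs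

-- the body of A from the 'for idx, _ in enumerate(charset[iter])' loop on, recursion fuelled by
-- the remaining depth (Python recurses at most len(charset) levels); state = (positions, yielded words)
def genAuxA (d : PySem.Dict Int String) (positions : List Int) (iter : Int) (fuel : Nat) : List Int × List String :=
  match fuel with
  | 0 => (positions, [])
  | fuel + 1 =>
    (PySem.List.enumerate (d.getD iter "").toList).foldl
      (fun st p =>
        let ps := pvSetIdx st.1 iter p.1
        if iter = (d.size : Int) - 1 then
          (ps, st.2 ++ [pvJoinWord d ps])
        else
          let r := genAuxA d ps (iter + 1) fuel
          (r.1, st.2 ++ r.2))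
      (positions, [])

def gen_wordlist (charset : List (Int × String)) (positions : Option (List Int)) (prev_iter : Option Int) : List String :=
  let d := PySem.Dict.ofList charset
  match prev_iter with
  | none => (genAuxA d (List.replicate d.size 0) 0 d.size).2
  | some k =>
    match positions with
    | some ps => (genAuxA d ps (k + 1) (d.size - (k + 1).toNat)).2
    | none => []   -- Python raises TypeError here (positions is None); excluded by Pre_

-- ===== PORT B =====
-- Python 'w + ch': concatenation of the code-point lists
def pvStrCat (a b : String) : String := String.ofList (a.toList ++ b.toList)

def gen_wordlist_alt (charset : List (Int × String)) (positions : Option (List Int)) (prev_iter : Option Int) : List String :=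
  let d := PySem.Dict.ofList charset
  let start : Int := match prev_iter with | none => 0 | some k => k + 1
  -- positions[j] is only evaluated for j ∈ range(start); a None positions with 0 < start is excluded by Pre_
  let ps : List Int := positions.getD []
  let pre := PySem.Str.join "" ((PySem.List.pyRange 0 start).map (fun j => pvCharAt d j (PySem.List.pyGetD ps j 0)))
  let words := (PySem.List.pyRange start (d.size : Int)).foldl
      (fun ws (i : Int) =>
        ws.flatMap (fun w => (d.getD i "").toList.map (fun ch => pvStrCat w (String.ofList [ch]))))
      [""]
  words.map (fun w => pvStrCat pre w)

-- ===== PRECONDITION & SPEC =====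
-- Pre_ excludes the inputs on which A raises (KeyError/IndexError/TypeError: empty dict, keys other
-- than 0..len-1 that the recursion reaches, a missing/short/overlong or out-of-range positions list
-- that a produced word touches) and the resume calls on which A accidentally returns [] only because
-- an empty charset empties the recursion before the invalid positions list or missing prefix key is
-- ever touched — B validates its fixed prefix eagerly and raises there.
def Pre_gen_wordlist (charset : List (Int × String)) (positions : Option (List Int)) (prev_iter : Option Int) : Prop :=
  (let d := PySem.Dict.ofList charset
   let n := d.size
   match prev_iter with
   | none =>
     decide (0 < n) &&
     (List.range n).all (fun t =>
       !((List.range t).all (fun j => d.getD (j : Int) "" != "")) || d.contains (t : Int))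
   | some k =>
     decide (-1 ≤ k) && decide (k + 1 < (n : Int)) &&
     (match positions with
      | none => false
      | some ps =>
        let s := (k + 1).toNat
        decide (ps.length = n) &&
        (List.range s).all (fun j => (PySem.Str.pyGet? (d.getD (j : Int) "") (ps.getD j 0)).isSome) &&
        (List.range n).all (fun t =>
          decide (t < s) ||
          !((List.range t).all (fun j => decide (j < s) || d.getD (j : Int) "" != "")) ||
          d.contains (t : Int)))) = true
instance (charset : List (Int × String)) (positions : Option (List Int)) (prev_iter : Option Int) : Decidable (Pre_gen_wordlist charset positions prev_iter) := by unfold Pre_gen_wordlist; infer_instance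

def pvWitness_gen_wordlist : (List (Int × String)) × Option (List Int) × Option Int :=
  ([(0, "ab"), (1, "c")], none, none)

def Spec_gen_wordlist (charset : List (Int × String)) (positions : Option (List Int)) (prev_iter : Option Int) (out : List String) : Prop := out = gen_wordlist_alt charset positions prev_iter
instance (charset : List (Int × String)) (positions : Option (List Int)) (prev_iter : Option Int) (out : List String) : Decidable (Spec_gen_wordlist charset positions prev_iter out) := by unfold Spec_gen_wordlist; infer_instance

-- ===== CLAIM (what is proved, stated in full; the proofs are below) =====
def Claim_equal_gen_wordlist : Prop := ∀ (charset : List (Int × String)) (positions : Option (List Int)) (prev_iter : Option Int), Dom_gen_wordlist charset positions prev_iter → Pre_gen_wordlist charset positions prev_iter → Spec_gen_wordlist charset positions prev_iter (gen_wordlist charset positions prev_iter)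

-- ===== LEMMAS AND PROOFS =====

-- the Cartesian product of a list of charsets, last position fastest (proof-side spec object)
def prodC : List (List Char) → List (List Char)
  | [] => [[]]
  | s :: rest => s.flatMap (fun c => (prodC rest).map (fun w => c :: w))

-- charset at position i, as a char list
def chsAt (d : PySem.Dict Int String) (i : Nat) : List Char := (d.getD (i : Int) "").toList

-- code points of the word prefix determined by positions[0:m]
def prefC (d : PySem.Dict Int String) (ps : List Int) (m : Nat) : List Char :=
  ((List.range m).map (fun (j : Nat) => (pvCharAt d (j : Int) (ps.getD j 0)).toList)).flatten

lemma toList_injective : Function.Injective String.toList := by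
  intro a b h
  have h2 := congrArg String.ofList h
  simpa [String.ofList_toList] using h2

lemma enumerate_cons {α : Type} (x : α) (t : List α) (s : Int) :
    PySem.List.enumerate (x :: t) s = (s, x) :: PySem.List.enumerate t (s + 1) := rfl

-- a loop over enumerate(cs) that only uses the indices is a loop over the index range
lemma foldl_enumerate_fst {σ : Type} (h : σ → Int → σ) :
    ∀ (cs : List Char) (start : Nat) (init : σ),
      (PySem.List.enumerate cs (start : Int)).foldl (fun st p => h st p.1) init
        = (List.range' start cs.length).foldl (fun st (i : Nat) => h st (i : Int)) init := by
  intro cs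
  induction cs with
  | nil => intro start init; rfl
  | cons c t ih =>
    intro start init
    rw [enumerate_cons]
    simp only [List.length_cons, List.range'_succ, List.foldl_cons]
    have hc : (start : Int) + 1 = ((start + 1 : Nat) : Int) := by push_cast; ring
    rw [hc]
    exact ih (start + 1) (h init (start : Int))

lemma getD_set_self (l : List Int) (i : Nat) (v : Int) (h : i < l.length) :
    (l.set i v).getD i 0 = v := by
  simp [List.getD, h]

lemma getD_set_ne (l : List Int) (i : Nat) (v : Int) (j : Nat) (h : i ≠ j) :
    (l.set i v).getD j 0 = l.getD j 0 := by
  simp [List.getD, h]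

lemma pvSetIdx_eq_set (l : List Int) (i : Nat) (v : Int) (h : i < l.length) :
    pvSetIdx l (i : Int) v = l.set i v := by
  have h1 : ¬ ((i : Int) < 0) := by omega
  have h2 : (0 : Int) ≤ (i : Int) ∧ (i : Int) < l.length := by omega
  simp only [pvSetIdx, h1, if_false, h2, and_self, if_true, Int.toNat_natCast]

lemma joinNil (ls : List (List Char)) : PySem.Chars.join [] ls = ls.flatten := by
  induction ls with
  | nil => simp [PySem.Chars.join_nil]
  | cons a t ih =>
    cases t with
    | nil => simp [PySem.Chars.join_singleton]
    | cons b r => rw [PySem.Chars.join_cons_cons]; simp_all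

lemma foldl_enumerate_fst0 {σ : Type} (h : σ → Int → σ) (cs : List Char) (init : σ) :
    (PySem.List.enumerate cs).foldl (fun st p => h st p.1) init
      = (List.range cs.length).foldl (fun st (i : Nat) => h st (i : Int)) init := by
  have h0 := foldl_enumerate_fst h cs 0 init
  simpa [List.range_eq_range'] using h0

lemma enumerate_eq_map (ps : List Int) : ∀ start : Int,
    PySem.List.enumerate ps start
      = (List.range ps.length).map (fun (j : Nat) => (start + (j : Int), ps.getD j 0)) := by
  induction ps with
  | nil => intro start; rfl
  | cons x t ih =>
    intro start
    rw [enumerate_cons, ih (start + 1)]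
    rw [List.length_cons, List.range_succ_eq_map]
    simp only [List.map_cons, List.map_map]
    congr 1
    · simp
    · apply List.map_congr_left
      intro j _
      simp only [Function.comp_apply]
      refine Prod.ext ?_ ?_
      · push_cast; ring
      · simp [List.getD]

lemma chs_map_getD (cs : List Char) : (List.range cs.length).map (fun (j : Nat) => cs.getD j ' ') = cs := by
  apply List.ext_getElem
  · simp
  · intro i h1 h2
    simp [List.getD, List.getElem?_eq_getElem h2]

lemma range_flatMap_getD {β : Type} (cs : List Char) (F : Char → List β) :
    (List.range cs.length).flatMap (fun (idx : Nat) => F (cs.getD idx ' ')) = cs.flatMap F := by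
  conv_rhs => rw [← chs_map_getD cs]
  rw [List.flatMap_map]

lemma pvCharAt_toList (d : PySem.Dict Int String) (it idx : Nat)
    (hidx : idx < (chsAt d it).length) :
    (pvCharAt d (it : Int) (idx : Int)).toList = [(chsAt d it).getD idx ' '] := by
  unfold pvCharAt
  rw [PySem.Str.pyGet?_natCast]
  have h1 : (d.getD (it : Int) "").toList[idx]? = some ((chsAt d it).getD idx ' ') := by
    unfold chsAt at hidx ⊢
    rw [List.getElem?_eq_getElem hidx]
    simp [List.getD, List.getElem?_eq_getElem hidx]
  rw [h1]
  simp

lemma joinWord_toList (d : PySem.Dict Int String) (ps : List Int) :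
    (pvJoinWord d ps).toList = prefC d ps ps.length := by
  unfold pvJoinWord prefC
  rw [PySem.Str.toList_join, List.map_map]
  have he : PySem.List.enumerate ps = PySem.List.enumerate ps 0 := rfl
  rw [he, enumerate_eq_map ps 0]
  have hsep : ("" : String).toList = [] := rfl
  rw [hsep, joinNil, List.map_map]
  congr 1
  apply List.map_congr_left
  intro j _
  simp

lemma prefC_congr (d : PySem.Dict Int String) (ps qs : List Int) (m : Nat)
    (h : ∀ j < m, ps.getD j 0 = qs.getD j 0) : prefC d ps m = prefC d qs m := by
  unfold prefC
  congr 1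
  exact List.map_congr_left (by intro j hj; rw [h j (List.mem_range.mp hj)])

lemma prefC_set_of_le (d : PySem.Dict Int String) (ps : List Int) (m k : Nat) (v : Int)
    (h : m ≤ k) : prefC d (ps.set k v) m = prefC d ps m := by
  apply prefC_congr
  intro j hj
  exact getD_set_ne ps k v j (by omega)

lemma prefC_succ_set (d : PySem.Dict Int String) (ps : List Int) (it : Nat) (idx : Nat)
    (hlen : it < ps.length) (hidx : idx < (chsAt d it).length) :
    prefC d (ps.set it (idx : Int)) (it + 1) = prefC d ps it ++ [(chsAt d it).getD idx ' '] := by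
  unfold prefC
  rw [List.range_succ, List.map_append, List.flatten_append]
  congr 1
  · congr 1
    apply List.map_congr_left
    intro j hj
    rw [getD_set_ne ps it (idx : Int) j (by simp at hj; omega)]
  · simp only [List.map_cons, List.map_nil, List.flatten_cons, List.flatten_nil, List.append_nil]
    rw [getD_set_self ps it (idx : Int) hlen]
    exact pvCharAt_toList d it idx hidx

-- the loop at the last level: one word appended per character index
lemma leaf_loop (d : PySem.Dict Int String) (n : Nat) (hn : n = d.size) (hn0 : 0 < n) :
    ∀ (idxs : List Nat) (ps : List Int) (acc : List String),
      ps.length = n → (∀ idx ∈ idxs, idx < (chsAt d (n - 1)).length) →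
      (let r := idxs.foldl
          (fun (st : List Int × List String) (idx : Nat) =>
            let qs := pvSetIdx st.1 ((n - 1 : Nat) : Int) ((idx : Nat) : Int)
            (qs, st.2 ++ [pvJoinWord d qs])) (ps, acc)
       r.2.map String.toList
           = acc.map String.toList
             ++ idxs.map (fun idx => prefC d ps (n - 1) ++ [(chsAt d (n - 1)).getD idx ' '])
         ∧ r.1.length = n ∧ ∀ j < n - 1, r.1.getD j 0 = ps.getD j 0) := by
  intro idxs
  induction idxs with
  | nil =>
    intro ps acc hlen _
    exact ⟨by simp, hlen, fun j _ => rfl⟩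
  | cons idx rest ih =>
    intro ps acc hlen hbound
    have hidx : idx < (chsAt d (n - 1)).length := hbound idx (by simp)
    have hn1 : n - 1 < ps.length := by omega
    have hset : pvSetIdx ps ((n - 1 : Nat) : Int) (idx : Int) = ps.set (n - 1) (idx : Int) :=
      pvSetIdx_eq_set ps (n - 1) (idx : Int) hn1
    simp only [List.foldl_cons, hset]
    obtain ⟨ha, hb, hc⟩ := ih (ps.set (n - 1) (idx : Int))
      (acc ++ [pvJoinWord d (ps.set (n - 1) (idx : Int))])
      (by simp [hlen]) (fun i hi => hbound i (List.mem_cons_of_mem _ hi))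
    refine ⟨?_, hb, ?_⟩
    · rw [ha]
      have hw : (pvJoinWord d (ps.set (n - 1) (idx : Int))).toList
          = prefC d ps (n - 1) ++ [(chsAt d (n - 1)).getD idx ' '] := by
        rw [joinWord_toList]
        have hl : (ps.set (n - 1) (idx : Int)).length = n := by simp [hlen]
        rw [hl]
        have hne : n = (n - 1) + 1 := by omega
        rw [hne]
        exact prefC_succ_set d ps (n - 1) idx hn1 hidx
      have hpp : ∀ i ∈ rest, prefC d (ps.set (n - 1) (idx : Int)) (n - 1) ++
            [(chsAt d (n - 1)).getD i ' '] = prefC d ps (n - 1) ++ [(chsAt d (n - 1)).getD i ' '] := by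
        intro i _
        rw [prefC_set_of_le d ps (n - 1) (n - 1) (idx : Int) le_rfl]
      rw [List.map_congr_left hpp]
      simp [hw, List.append_assoc]
    · intro j hj
      rw [hc j hj, getD_set_ne ps (n - 1) (idx : Int) j (by omega)]

-- the loop at an inner level, given the recursion's behaviour one level deeper
lemma rec_loop (d : PySem.Dict Int String) (n : Nat) (hn : n = d.size)
    (it : Nat) (fuel : Nat)
    (IH : ∀ qs : List Int, qs.length = n →
      (genAuxA d qs ((it + 1 : Nat) : Int) fuel).2.map String.toList
          = (prodC ((List.range' (it + 1) (n - (it + 1))).map (chsAt d))).map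
              (fun t => prefC d qs (it + 1) ++ t)
        ∧ (genAuxA d qs ((it + 1 : Nat) : Int) fuel).1.length = n
        ∧ ∀ j < it + 1, (genAuxA d qs ((it + 1 : Nat) : Int) fuel).1.getD j 0 = qs.getD j 0) :
    ∀ (idxs : List Nat) (ps : List Int) (acc : List String),
      ps.length = n → it + 1 < n → (∀ idx ∈ idxs, idx < (chsAt d it).length) →
      (let r := idxs.foldl
          (fun (st : List Int × List String) (idx : Nat) =>
            let qs := pvSetIdx st.1 ((it : Nat) : Int) ((idx : Nat) : Int)
            let rr := genAuxA d qs ((it + 1 : Nat) : Int) fuel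
            (rr.1, st.2 ++ rr.2)) (ps, acc)
       r.2.map String.toList
           = acc.map String.toList
             ++ idxs.flatMap (fun idx =>
                  (prodC ((List.range' (it + 1) (n - (it + 1))).map (chsAt d))).map
                    (fun t => prefC d ps it ++ (chsAt d it).getD idx ' ' :: t))
         ∧ r.1.length = n ∧ ∀ j < it, r.1.getD j 0 = ps.getD j 0) := by
  intro idxs
  induction idxs with
  | nil =>
    intro ps acc hlen _ _
    exact ⟨by simp, hlen, fun j _ => rfl⟩
  | cons idx rest ih =>
    intro ps acc hlen hlt hbound
    have hidx : idx < (chsAt d it).length := hbound idx (by simp)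
    have hit : it < ps.length := by omega
    have hset : pvSetIdx ps ((it : Nat) : Int) (idx : Int) = ps.set it (idx : Int) :=
      pvSetIdx_eq_set ps it (idx : Int) hit
    simp only [List.foldl_cons, hset]
    obtain ⟨ga, gb, gc⟩ := IH (ps.set it (idx : Int)) (by simp [hlen])
    obtain ⟨ha, hb, hc⟩ := ih (genAuxA d (ps.set it (idx : Int)) ((it + 1 : Nat) : Int) fuel).1
      (acc ++ (genAuxA d (ps.set it (idx : Int)) ((it + 1 : Nat) : Int) fuel).2)
      gb hlt (fun i hi => hbound i (List.mem_cons_of_mem _ hi))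
    refine ⟨?_, hb, ?_⟩
    · rw [ha]
      have hpfx : prefC d (ps.set it (idx : Int)) (it + 1)
          = prefC d ps it ++ [(chsAt d it).getD idx ' '] := prefC_succ_set d ps it idx hit hidx
      have hpp : ∀ i ∈ rest,
          ((prodC ((List.range' (it + 1) (n - (it + 1))).map (chsAt d))).map
            (fun t => prefC d (genAuxA d (ps.set it (idx : Int)) ((it + 1 : Nat) : Int) fuel).1 it
              ++ (chsAt d it).getD i ' ' :: t))
          = ((prodC ((List.range' (it + 1) (n - (it + 1))).map (chsAt d))).map
            (fun t => prefC d ps it ++ (chsAt d it).getD i ' ' :: t)) := by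
        intro i _
        have h1 : prefC d (genAuxA d (ps.set it (idx : Int)) ((it + 1 : Nat) : Int) fuel).1 it
            = prefC d ps it := by
          apply prefC_congr
          intro j hj
          rw [gc j (by omega), getD_set_ne ps it (idx : Int) j (by omega)]
        rw [h1]
      have hfl : ∀ (f g : Nat → List (List Char)), (∀ i ∈ rest, f i = g i) →
          rest.flatMap f = rest.flatMap g := by
        intro f g h
        simp only [List.flatMap_def]
        rw [List.map_congr_left h]
      rw [hfl _ _ hpp, List.map_append, ga, hpfx]
      simp [List.flatMap_cons, List.append_assoc]
    · intro j hj
      rw [hc j (by omega), gc j (by omega), getD_set_ne ps it (idx : Int) j (by omega)]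

-- the loop body of genAuxA, named so the enumerate-loop can be rewritten to an index loop
def stepFull (d : PySem.Dict Int String) (iter : Int) (fuel : Nat)
    (st : List Int × List String) (z : Int) : List Int × List String :=
  let ps := pvSetIdx st.1 iter z
  if iter = (d.size : Int) - 1 then
    (ps, st.2 ++ [pvJoinWord d ps])
  else
    let r := genAuxA d ps (iter + 1) fuel
    (r.1, st.2 ++ r.2)

lemma genAuxA_succ (d : PySem.Dict Int String) (ps : List Int) (iter : Int) (fuel : Nat) :
    genAuxA d ps iter (fuel + 1)
      = (List.range (d.getD iter "").toList.length).foldl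
          (fun st (i : Nat) => stepFull d iter fuel st (i : Int)) (ps, []) :=
  foldl_enumerate_fst0 (stepFull d iter fuel) _ _

-- characterisation of A's recursion
lemma genAuxA_spec (d : PySem.Dict Int String) :
    ∀ (fuel : Nat) (it : Nat) (ps : List Int),
      it < d.size → ps.length = d.size → d.size - it ≤ fuel →
      (genAuxA d ps (it : Int) fuel).2.map String.toList
          = (prodC ((List.range' it (d.size - it)).map (chsAt d))).map (fun t => prefC d ps it ++ t)
        ∧ (genAuxA d ps (it : Int) fuel).1.length = d.size
        ∧ ∀ j < it, (genAuxA d ps (it : Int) fuel).1.getD j 0 = ps.getD j 0 := by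
  intro fuel
  induction fuel with
  | zero => intro it ps h1 _ h3; omega
  | succ fuel ihf =>
    intro it ps h1 hlen h3
    rw [genAuxA_succ]
    by_cases hleaf : it = d.size - 1
    · subst hleaf
      have hstep : ∀ (st : List Int × List String) (i : Nat),
          i ∈ List.range (d.getD ((d.size - 1 : Nat) : Int) "").toList.length →
          stepFull d ((d.size - 1 : Nat) : Int) fuel st (i : Int)
            = (pvSetIdx st.1 ((d.size - 1 : Nat) : Int) ((i : Nat) : Int),
               st.2 ++ [pvJoinWord d (pvSetIdx st.1 ((d.size - 1 : Nat) : Int) ((i : Nat) : Int))]) := by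
        intro st i _
        unfold stepFull
        rw [if_pos (by omega)]
      have hfold := PySem.List.foldl_congr_mem _ _ _ ((ps, []) : List Int × List String) hstep
      rw [hfold]
      have hch : (d.getD ((d.size - 1 : Nat) : Int) "").toList = chsAt d (d.size - 1) := rfl
      rw [hch]
      obtain ⟨ha, hb, hc⟩ := leaf_loop d d.size rfl (by omega)
        (List.range (chsAt d (d.size - 1)).length) ps [] hlen
        (fun idx h => List.mem_range.mp h)
      refine ⟨?_, hb, hc⟩
      rw [ha]
      have h1' : d.size - (d.size - 1) = 1 := by omega
      rw [h1']
      have hr1 : List.range' (d.size - 1) 1 = [d.size - 1] := rfl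
      rw [hr1]
      simp only [List.map_cons, List.map_nil]
      have hsing : ∀ (cs : List Char), cs.flatMap (fun c => [[c]]) = cs.map (fun c => [c]) := by
        intro cs
        induction cs with
        | nil => rfl
        | cons c t iht => simp [iht]
      have hps : prodC [chsAt d (d.size - 1)] = (chsAt d (d.size - 1)).map (fun c => [c]) := by
        simp [prodC, hsing]
      rw [hps]
      conv_rhs => rw [← chs_map_getD (chsAt d (d.size - 1))]
      simp [List.map_map, Function.comp_def]
    · have hlt : it + 1 < d.size := by omega
      have hstep : ∀ (st : List Int × List String) (i : Nat),
          i ∈ List.range (d.getD ((it : Nat) : Int) "").toList.length →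
          stepFull d ((it : Nat) : Int) fuel st (i : Int)
            = (let qs := pvSetIdx st.1 ((it : Nat) : Int) ((i : Nat) : Int)
               let rr := genAuxA d qs ((it + 1 : Nat) : Int) fuel
               (rr.1, st.2 ++ rr.2)) := by
        intro st i _
        unfold stepFull
        rw [if_neg (by omega)]
        have hc : ((it : Nat) : Int) + 1 = ((it + 1 : Nat) : Int) := by push_cast; ring
        rw [hc]
      have hfold := PySem.List.foldl_congr_mem _ _ _ ((ps, []) : List Int × List String) hstep
      rw [hfold]
      have hch : (d.getD ((it : Nat) : Int) "").toList = chsAt d it := rfl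
      rw [hch]
      obtain ⟨ha, hb, hc⟩ := rec_loop d d.size rfl it fuel
        (fun qs hq => ihf (it + 1) qs hlt hq (by omega))
        (List.range (chsAt d it).length) ps [] hlen hlt
        (fun idx h => List.mem_range.mp h)
      refine ⟨?_, hb, hc⟩
      rw [ha]
      rw [range_flatMap_getD (chsAt d it)
        (fun c => (prodC ((List.range' (it + 1) (d.size - (it + 1))).map (chsAt d))).map
          (fun t => prefC d ps it ++ c :: t))]
      have hsz : d.size - it = (d.size - (it + 1)) + 1 := by omega
      rw [hsz, List.range'_succ, List.map_cons]
      simp [prodC, List.map_flatMap, List.map_map, Function.comp_def]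

-- characterisation of B's fold
lemma alt_loop (d : PySem.Dict Int String) :
    ∀ (k i : Nat) (ws : List String),
      (((List.range' i k).foldl
          (fun words j =>
            words.flatMap (fun w => (d.getD (j : Int) "").toList.map
              (fun ch => pvStrCat w (String.ofList [ch])))) ws).map String.toList)
        = (ws.map String.toList).flatMap
            (fun w => (prodC ((List.range' i k).map (chsAt d))).map (fun t => w ++ t)) := by
  intro k
  induction k with
  | zero => intro i ws; simp [prodC]
  | succ k ihk =>
    intro i ws
    rw [List.range'_succ, List.foldl_cons, ihk (i + 1)]
    have htl : ∀ (w : String) (ch : Char),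
        (pvStrCat w (String.ofList [ch])).toList = w.toList ++ [ch] := by
      intro w ch
      simp [pvStrCat]
    simp [prodC, List.map_flatMap, List.flatMap_map, List.map_map, List.flatMap_assoc,
      htl, List.append_assoc, Function.comp_def, chsAt]

-- B's index fold over pyRange start n, rewritten as the Nat-range' fold of alt_loop
lemma pyRange_natCast_fold (d : PySem.Dict Int String) (a n : Nat) (ws : List String) :
    ((PySem.List.pyRange (a : Int) (n : Int)).foldl
        (fun words (i : Int) =>
          words.flatMap (fun w => (d.getD i "").toList.map
            (fun ch => pvStrCat w (String.ofList [ch])))) ws)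
      = (List.range' a (n - a)).foldl
          (fun words (j : Nat) =>
            words.flatMap (fun w => (d.getD (j : Int) "").toList.map
              (fun ch => pvStrCat w (String.ofList [ch])))) ws := by
  rw [PySem.List.pyRange_one]
  have hc : ((n : Int) - (a : Int)).toNat = n - a := by omega
  rw [hc, List.range'_eq_map_range, List.foldl_map, List.foldl_map]
  apply PySem.List.foldl_congr_mem
  intro acc x _
  have hx : ((a : Int) + (x : Int)) = ((a + x : Nat) : Int) := by push_cast; ring
  rw [hx]

-- B's prefix equals prefC
lemma alt_prefix_toList (d : PySem.Dict Int String) (ps : List Int) (s : Nat) :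
    (PySem.Str.join "" ((PySem.List.pyRange 0 (s : Int)).map
        (fun j => pvCharAt d j (PySem.List.pyGetD ps j 0)))).toList = prefC d ps s := by
  rw [PySem.List.pyRange_zero_natCast, List.map_map, PySem.Str.toList_join, List.map_map]
  have hsep : ("" : String).toList = [] := rfl
  rw [hsep, joinNil]
  unfold prefC
  congr 1
  apply List.map_congr_left
  intro j _
  simp [PySem.List.pyGetD_natCast]

-- everything B returns, on the char-list side
lemma alt_side (d : PySem.Dict Int String) (ps : List Int) (s : Nat) :
    ((((PySem.List.pyRange (s : Int) (d.size : Int)).foldl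
          (fun ws (i : Int) =>
            ws.flatMap (fun w => (d.getD i "").toList.map
              (fun ch => pvStrCat w (String.ofList [ch])))) [""]).map
        (fun w => pvStrCat (PySem.Str.join "" ((PySem.List.pyRange 0 (s : Int)).map
            (fun j => pvCharAt d j (PySem.List.pyGetD ps j 0)))) w)).map String.toList)
      = (prodC ((List.range' s (d.size - s)).map (chsAt d))).map
          (fun t => prefC d ps s ++ t) := by
  rw [pyRange_natCast_fold, List.map_map]
  have h1 : (List.map (String.toList ∘ fun w => pvStrCat (PySem.Str.join ""
        ((PySem.List.pyRange 0 (s : Int)).map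
          (fun j => pvCharAt d j (PySem.List.pyGetD ps j 0)))) w))
      = fun l => (l.map String.toList).map (fun t => prefC d ps s ++ t) := by
    funext l
    rw [List.map_map]
    apply List.map_congr_left
    intro w _
    simp only [Function.comp_apply, pvStrCat, String.toList_ofList]
    rw [alt_prefix_toList]
  rw [h1]
  beta_reduce
  rw [alt_loop]
  simp

-- ===== VERDICT (by name: the statement is the Claim_ definition above) =====
theorem gen_wordlist_spec : Claim_equal_gen_wordlist := by
  intro charset positions prev_iter _ hpre
  unfold Spec_gen_wordlist gen_wordlist gen_wordlist_alt
  unfold Pre_gen_wordlist at hpre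
  cases prev_iter with
  | none =>
    simp only [Bool.and_eq_true, decide_eq_true_eq] at hpre
    have hn : 0 < (PySem.Dict.ofList charset).size := hpre.1
    dsimp only
    apply List.map_injective_iff.mpr toList_injective
    obtain ⟨hA, -, -⟩ := genAuxA_spec (PySem.Dict.ofList charset)
      (PySem.Dict.ofList charset).size 0
      (List.replicate (PySem.Dict.ofList charset).size 0) hn (by simp) le_rfl
    simp only [Nat.cast_zero] at hA
    rw [hA]
    have hB := alt_side (PySem.Dict.ofList charset) (positions.getD []) 0
    simp only [Nat.cast_zero] at hB
    rw [hB]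
    simp [prefC]
  | some k =>
    cases positions with
    | none => simp at hpre
    | some ps =>
      simp only [Bool.and_eq_true, decide_eq_true_eq] at hpre
      obtain ⟨⟨hk, hlt⟩, ⟨hlen, -⟩, -⟩ := hpre
      dsimp only
      set it := (k + 1).toNat with hitdef
      have hki : k + 1 = (it : Int) := by omega
      have hit : it < (PySem.Dict.ofList charset).size := by omega
      rw [hki]
      apply List.map_injective_iff.mpr toList_injective
      obtain ⟨hA, -, -⟩ := genAuxA_spec (PySem.Dict.ofList charset)
        ((PySem.Dict.ofList charset).size - it) it ps hit hlen le_rfl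
      rw [hA]
      simp only [Option.getD_some]
      have hB := alt_side (PySem.Dict.ofList charset) ps it
      rw [hB]
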